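-- pv_equiv track=rewrite | github.com/mangahazo/bsides | BSidesMG_Bon2Clat [medium]/main copy.py | clat
-- ===== SOURCE A (Python) =====
-- import string
--
-- def clat(hafatra,shift):
--     clat = ''
--     for i in hafatra:
--         if i not in string.ascii_letters:
--             clat += i
--         else:
--             if i in string.ascii_lowercase:
--                 start = ord('a')
--             else:
--                 start = ord('A')
--             clat += chr(((ord(i) - start + shift) % 26) + start)
--
--     return clat[-1] + clat[:-1].swapcase()
-- ===== SOURCE B (Python) =====
-- import string
--
-- def clat(hafatra, shift):
--     # Build the whole substitution table once, then translate in a single pass.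
--     k = shift % 26
--     lo = string.ascii_lowercase
--     up = string.ascii_uppercase
--     table = str.maketrans(lo + up, lo[k:] + lo[:k] + up[k:] + up[:k])
--     res = hafatra.translate(table)
--     return res[-1] + res[:-1].swapcase()
-- ===== Notes on version B (the rewrite author's own statement) =====
-- stated objective: idiomatic
-- what changed: Replaces the per-character if/else branching loop by one prebuilt str.maketrans table (keyed alphabet -> slice-rotated alphabet, so the per-character shift arithmetic disappears too) and a single translate pass; same final rotate+swapcase step.
-- outside the precondition, e.g. on clat('', 5): A raises IndexError, B raises IndexError
import Mathlib
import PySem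

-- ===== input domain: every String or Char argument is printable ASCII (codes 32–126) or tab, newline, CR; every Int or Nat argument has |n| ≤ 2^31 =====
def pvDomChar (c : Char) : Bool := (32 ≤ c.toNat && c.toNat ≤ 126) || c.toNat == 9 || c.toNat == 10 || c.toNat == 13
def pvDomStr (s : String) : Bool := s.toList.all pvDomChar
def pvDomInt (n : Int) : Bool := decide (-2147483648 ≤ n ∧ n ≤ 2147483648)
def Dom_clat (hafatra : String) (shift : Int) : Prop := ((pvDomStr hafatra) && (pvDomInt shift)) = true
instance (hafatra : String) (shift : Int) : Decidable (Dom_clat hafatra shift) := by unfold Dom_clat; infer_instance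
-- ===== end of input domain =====

-- B replaces A's per-character if/else Caesar loop by one prebuilt maketrans table
-- (keyed by the rotated alphabets) and a single translate pass; same tail step.

-- ===== PORT A =====
-- string.ascii_lowercase / ascii_uppercase (membership of a 1-char string = char membership)
def asciiLower : List Char := "abcdefghijklmnopqrstuvwxyz".toList
def asciiUpper : List Char := "ABCDEFGHIJKLMNOPQRSTUVWXYZ".toList

-- str.swapcase(), ported by hand character by character (exact on the ASCII domain)
def pySwapChar (c : Char) : Char :=
  if PySem.Chars.islower c then PySem.Chars.upperChar c
  else if PySem.Chars.isupper c then PySem.Chars.lowerChar c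
  else c

-- the else-branch of A's loop: pick start by lowercase membership, then shift
def clatShiftChar (shift : Int) (i : Char) : Char :=
  let start : Int := if i ∈ asciiLower then 97 else 65
  Char.ofNat (PySem.Int.mod ((i.toNat : Int) - start + shift) 26 + start).toNat

def clat (hafatra : String) (shift : Int) : String :=
  let cs := hafatra.toList.foldl
    (fun acc i =>
      if i ∉ asciiLower ++ asciiUpper then acc ++ [i]
      else acc ++ [clatShiftChar shift i]) []
  match PySem.List.pyGet? cs (-1) with
  | some last => String.ofList ([last] ++ (PySem.List.slice cs none (some (-1))).map pySwapChar)
  | none => ""  -- Python raises IndexError on clat[-1] here; excluded by Pre_clat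

-- ===== PORT B =====
-- str.maketrans(keys, vals) is a dict from chars of keys to the char of vals at the
-- same position (later duplicates overwrite); s.translate(t) maps each char through
-- the dict, leaving unmapped chars unchanged.
def clat_alt (hafatra : String) (shift : Int) : String :=
  let k := PySem.Int.mod shift 26
  let keys := asciiLower ++ asciiUpper
  let vals := (PySem.List.slice asciiLower (some k) none ++ PySem.List.slice asciiLower none (some k))
           ++ (PySem.List.slice asciiUpper (some k) none ++ PySem.List.slice asciiUpper none (some k))
  let table := (keys.zip vals).foldl (fun d p => d.insert p.1 p.2) (PySem.Dict.empty : PySem.Dict Char Char)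
  let res := hafatra.toList.map (fun c => table.getD c c)
  match PySem.List.pyGet? res (-1) with
  | some last => String.ofList ([last] ++ (PySem.List.slice res none (some (-1))).map pySwapChar)
  | none => ""  -- Python raises IndexError on res[-1] here; excluded by Pre_clat

-- ===== PRECONDITION & SPEC =====
-- Pre_ excludes only the empty string, on which A raises IndexError at clat[-1].
def Pre_clat (hafatra : String) (shift : Int) : Prop := hafatra ≠ ""
instance (hafatra : String) (shift : Int) : Decidable (Pre_clat hafatra shift) := by unfold Pre_clat; infer_instance
def pvWitness_clat : String × Int := ("Bonjour, Clat!", 3)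

def Spec_clat (hafatra : String) (shift : Int) (out : String) : Prop := out = clat_alt hafatra shift
instance (hafatra : String) (shift : Int) (out : String) : Decidable (Spec_clat hafatra shift out) := by unfold Spec_clat; infer_instance

-- ===== CLAIM (what is proved, stated in full; the proofs are below) =====
def Claim_equal_clat : Prop := ∀ (hafatra : String) (shift : Int), Dom_clat hafatra shift → Pre_clat hafatra shift → Spec_clat hafatra shift (clat hafatra shift)

-- ===== LEMMAS AND PROOFS =====

theorem toNat_ofNat_small (n : Nat) (h : n < 200) : (Char.ofNat n).toNat = n := by
  rw [Char.toNat_ofNat, if_pos (Or.inl (by omega))]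

-- folding inserts of pointwise pairs into a dict = a guarded lookup
theorem getD_foldl_insert_map {g : Char → Char} (ks : List Char) (d : PySem.Dict Char Char) (c : Char) :
    ((ks.map (fun x => (x, g x))).foldl (fun d p => d.insert p.1 p.2) d).getD c c
      = if c ∈ ks then g c else d.getD c c := by
  induction ks generalizing d with
  | nil => simp
  | cons k ks ih =>
      simp only [List.map_cons, List.foldl_cons, ih, PySem.Dict.getD_insert, List.mem_cons]
      split_ifs with h1 h2 h3 h3 <;> simp_all

-- the alphabets as range-maps
theorem asciiLower_eq : asciiLower = (List.range 26).map (fun j => Char.ofNat (97+j)) := by decide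
theorem asciiUpper_eq : asciiUpper = (List.range 26).map (fun j => Char.ofNat (65+j)) := by decide

theorem mem_rangeMap (base : Nat) (c : Char) :
    c ∈ (List.range 26).map (fun j => Char.ofNat (base+j)) ↔ ∃ j, j < 26 ∧ c = Char.ofNat (base+j) := by
  simp [List.mem_map, eq_comm, and_comm]

theorem mem_asciiLower_iff (c : Char) : c ∈ asciiLower ↔ ∃ j, j < 26 ∧ c = Char.ofNat (97+j) := by
  rw [asciiLower_eq]; exact mem_rangeMap 97 c

-- un-shifted upper-case letters are not lower-case letters
theorem upper_not_mem_lower (i : Nat) (hi : i < 26) : Char.ofNat (65+i) ∉ asciiLower := by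
  rw [mem_asciiLower_iff]
  rintro ⟨j, hj, he⟩
  have := congrArg Char.toNat he
  rw [toNat_ofNat_small _ (by omega), toNat_ofNat_small _ (by omega)] at this
  omega

theorem clatShiftChar_lower (shift : Int) (i : Nat) (hi : i < 26) :
    clatShiftChar shift (Char.ofNat (97+i)) = Char.ofNat (97 + (i + (PySem.Int.mod shift 26).toNat) % 26) := by
  have hmem : Char.ofNat (97+i) ∈ asciiLower := (mem_asciiLower_iff _).2 ⟨i, hi, rfl⟩
  simp only [clatShiftChar, if_pos hmem, toNat_ofNat_small (97+i) (by omega)]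
  congr 1
  have h1 : PySem.Int.mod (((97+i : Nat) : Int) - 97 + shift) 26 = (((97+i : Nat) : Int) - 97 + shift) % 26 :=
    PySem.Int.mod_eq_emod_of_pos (by norm_num)
  have h2 : PySem.Int.mod shift 26 = shift % 26 := PySem.Int.mod_eq_emod_of_pos (by norm_num)
  rw [h1, h2]
  omega

theorem clatShiftChar_upper (shift : Int) (i : Nat) (hi : i < 26) :
    clatShiftChar shift (Char.ofNat (65+i)) = Char.ofNat (65 + (i + (PySem.Int.mod shift 26).toNat) % 26) := by
  simp only [clatShiftChar, if_neg (upper_not_mem_lower i hi), toNat_ofNat_small (65+i) (by omega)]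
  congr 1
  have h1 : PySem.Int.mod (((65+i : Nat) : Int) - 65 + shift) 26 = (((65+i : Nat) : Int) - 65 + shift) % 26 :=
    PySem.Int.mod_eq_emod_of_pos (by norm_num)
  have h2 : PySem.Int.mod shift 26 = shift % 26 := PySem.Int.mod_eq_emod_of_pos (by norm_num)
  rw [h1, h2]
  omega

-- zipping an alphabet against its own rotation pairs each letter with its shift
theorem zip_rot (base k' : Nat) (hk : k' < 26) (g : Char → Char)
    (hg : ∀ i, i < 26 → g (Char.ofNat (base+i)) = Char.ofNat (base + (i + k') % 26)) :
    ((List.range 26).map (fun j => Char.ofNat (base+j))).zip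
      (((List.range 26).map (fun j => Char.ofNat (base+j))).drop k'
        ++ ((List.range 26).map (fun j => Char.ofNat (base+j))).take k')
    = ((List.range 26).map (fun j => Char.ofNat (base+j))).map (fun c => (c, g c)) := by
  have hlen : ((List.range 26).map (fun j => Char.ofNat (base+j))).length = 26 := by simp
  apply List.ext_getElem
  · simp; omega
  · intro i h1 h2
    have hi : i < 26 := by simpa using h2
    rw [List.getElem_zip]
    have hrotget : (((List.range 26).map (fun j => Char.ofNat (base+j))).drop k'
        ++ ((List.range 26).map (fun j => Char.ofNat (base+j))).take k')[i]'(by simp; omega)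
        = Char.ofNat (base + (i + k') % 26) := by
      by_cases hc : i < 26 - k'
      · rw [List.getElem_append_left (by simp; omega)]
        rw [List.getElem_drop]
        simp only [List.getElem_map, List.getElem_range]
        congr 1; omega
      · rw [List.getElem_append_right (by simp; omega)]
        simp only [List.getElem_take, List.getElem_map, List.getElem_range, List.length_drop,
          List.length_map, List.length_range]
        congr 1; omega
    rw [hrotget]
    simp only [List.getElem_map, List.getElem_range]
    rw [hg i hi]

-- the translation table's lookup is exactly A's per-character transformation
theorem table_getD (shift : Int) (c : Char) :
    (((asciiLower ++ asciiUpper).zip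
        ((PySem.List.slice asciiLower (some (PySem.Int.mod shift 26)) none
          ++ PySem.List.slice asciiLower none (some (PySem.Int.mod shift 26)))
         ++ (PySem.List.slice asciiUpper (some (PySem.Int.mod shift 26)) none
          ++ PySem.List.slice asciiUpper none (some (PySem.Int.mod shift 26))))).foldl
        (fun d p => d.insert p.1 p.2) (PySem.Dict.empty : PySem.Dict Char Char)).getD c c
      = if c ∈ asciiLower ++ asciiUpper then clatShiftChar shift c else c := by
  have hk0 : 0 ≤ PySem.Int.mod shift 26 := PySem.Int.mod_nonneg shift (by norm_num)
  have hk26 : PySem.Int.mod shift 26 < 26 := PySem.Int.mod_lt shift (by norm_num)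
  set k := PySem.Int.mod shift 26 with hkdef
  have hk'26 : k.toNat < 26 := by omega
  rw [PySem.List.slice_from _ hk0, PySem.List.slice_to _ hk0,
      PySem.List.slice_from _ hk0, PySem.List.slice_to _ hk0]
  have hlenlo : asciiLower.length = (asciiLower.drop k.toNat ++ asciiLower.take k.toNat).length := by
    simp [asciiLower]; omega
  rw [List.zip_append hlenlo]
  rw [asciiLower_eq, asciiUpper_eq]
  rw [zip_rot 97 k.toNat hk'26 (clatShiftChar shift)
        (fun i hi => by rw [clatShiftChar_lower shift i hi, hkdef]),
      zip_rot 65 k.toNat hk'26 (clatShiftChar shift)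
        (fun i hi => by rw [clatShiftChar_upper shift i hi, hkdef])]
  rw [← asciiLower_eq, ← asciiUpper_eq, ← List.map_append]
  exact getD_foldl_insert_map (asciiLower ++ asciiUpper) PySem.Dict.empty c

-- A's accumulator loop is a map
theorem foldl_clat_eq_map (shift : Int) (l : List Char) (acc : List Char) :
    l.foldl (fun acc i =>
        if i ∉ asciiLower ++ asciiUpper then acc ++ [i]
        else acc ++ [clatShiftChar shift i]) acc
      = acc ++ l.map (fun i => if i ∈ asciiLower ++ asciiUpper then clatShiftChar shift i else i) := by
  induction l generalizing acc with
  | nil => simp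
  | cons x xs ih =>
      simp only [List.foldl_cons, List.map_cons, ih]
      by_cases h : x ∈ asciiLower ++ asciiUpper <;> simp [h]

-- ===== VERDICT (by name: the statement is the Claim_ definition above) =====
theorem clat_spec : Claim_equal_clat := by
  intro hafatra shift _ _
  unfold Spec_clat clat clat_alt
  simp only [foldl_clat_eq_map, List.nil_append, table_getD]
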